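-- pv_equiv track=rewrite | github.com/Relaxed-System-Lab/HexGen | hexgen/hexgen_core/gen_hetero_groups.py | get_pp_groups
-- ===== SOURCE A (Python) =====
-- def get_pp_groups(tp_groups):
--     n = len(tp_groups)
--     max_len = max(len(tp_group) for tp_group in tp_groups)
--     pp_groups = []
--     for i in range(max_len):
--         pp_group = []
--         for tp_group in tp_groups:
--             if i < len(tp_group):
--                 pp_group.append(tp_group[i])
--             else:
--                 pp_group.append(tp_group[-1])
--         pp_groups.append(pp_group)
--     return pp_groups
-- ===== SOURCE B (Python) =====
-- def get_pp_groups(tp_groups):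
--     max_len = max(len(tp_group) for tp_group in tp_groups)
--     padded = [g + [g[-1]] * (max_len - len(g)) for g in tp_groups]
--     return [list(col) for col in zip(*padded)]
-- ===== Notes on version B (the rewrite author's own statement) =====
-- stated objective: simpler
-- what changed: Replaces A's double loop with a per-element if/else clamp by a two-phase pad-then-transpose: each group is padded with copies of its last element to the maximal length, then the rectangular matrix is transposed with zip(*padded), moving the inner loop into C-level list operations.
-- outside the precondition, e.g. on get_pp_groups([[], []]): A returns [], B raises IndexError
import Mathlib
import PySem

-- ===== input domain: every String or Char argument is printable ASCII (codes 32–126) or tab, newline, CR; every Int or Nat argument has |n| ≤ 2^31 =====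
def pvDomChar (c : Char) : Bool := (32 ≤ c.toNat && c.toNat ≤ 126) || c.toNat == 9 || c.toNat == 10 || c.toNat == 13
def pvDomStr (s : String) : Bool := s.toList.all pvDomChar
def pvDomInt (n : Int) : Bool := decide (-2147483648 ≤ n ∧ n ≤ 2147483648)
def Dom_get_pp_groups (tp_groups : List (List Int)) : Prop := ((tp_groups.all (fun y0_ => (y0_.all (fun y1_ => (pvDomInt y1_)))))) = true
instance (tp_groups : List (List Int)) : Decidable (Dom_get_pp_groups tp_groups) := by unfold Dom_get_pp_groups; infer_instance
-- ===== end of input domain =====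

-- B replaces A's per-element if/else clamp inside a double loop by padding each
-- group to the maximal length and then transposing the rectangular matrix (zip).

-- ===== PORT A =====
def get_pp_groups (tp_groups : List (List Int)) : List (List Int) :=
  match PySem.List.max? (tp_groups.map (fun g => (g.length : Int))) (fun y => y) with
  | none => []  -- Python raises ValueError here (tp_groups = [], excluded by Pre_)
  | some max_len =>
    (PySem.List.pyRange 0 max_len 1).foldl
      (fun pp_groups i =>
        pp_groups ++ [tp_groups.foldl
          (fun pp_group tp_group =>
            pp_group ++ [if i < (tp_group.length : Int)
                         then (PySem.List.pyGet? tp_group i).getD 0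
                         else (PySem.List.pyGet? tp_group (-1)).getD 0]) []]) []

-- ===== PORT B =====
def get_pp_groups_alt (tp_groups : List (List Int)) : List (List Int) :=
  match PySem.List.max? (tp_groups.map (fun g => (g.length : Int))) (fun y => y) with
  | none => []  -- Python raises ValueError here (tp_groups = [], excluded by Pre_)
  | some max_len =>
    let padded := tp_groups.map (fun g =>
      g ++ List.replicate (max_len - (g.length : Int)).toNat ((PySem.List.pyGet? g (-1)).getD 0))
    -- zip(*padded): truncate to the shortest row length, take the k-th entry of every row
    match padded.map List.length with
    | [] => []
    | L :: Ls => (List.range (Ls.foldl min L)).map (fun k => padded.map (fun r => r.getD k 0))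

-- ===== PRECONDITION & SPEC =====
-- Pre_ excludes the empty list (max() raises ValueError in both) and inputs containing an
-- empty tp_group: there tp_group[-1] raises IndexError in A unless every group is empty
-- (then A returns []), while B's padding expression g[-1] still raises IndexError.
def Pre_get_pp_groups (tp_groups : List (List Int)) : Prop :=
  tp_groups ≠ [] ∧ ∀ g ∈ tp_groups, g ≠ []
instance (tp_groups : List (List Int)) : Decidable (Pre_get_pp_groups tp_groups) := by
  unfold Pre_get_pp_groups; infer_instance
def pvWitness_get_pp_groups : List (List Int) := [[1, 2], [3]]

def Spec_get_pp_groups (tp_groups : List (List Int)) (out : List (List Int)) : Prop := out = get_pp_groups_alt tp_groups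
instance (tp_groups : List (List Int)) (out : List (List Int)) : Decidable (Spec_get_pp_groups tp_groups out) := by unfold Spec_get_pp_groups; infer_instance

-- ===== CLAIM (what is proved, stated in full; the proofs are below) =====
def Claim_equal_get_pp_groups : Prop := ∀ (tp_groups : List (List Int)), Dom_get_pp_groups tp_groups → Pre_get_pp_groups tp_groups → Spec_get_pp_groups tp_groups (get_pp_groups tp_groups)

-- ===== LEMMAS AND PROOFS =====

-- append-into-accumulator loop is a map
theorem pv_foldl_append_map {α β : Type} (f : α → β) (xs : List α) (acc : List β) :
    xs.foldl (fun a x => a ++ [f x]) acc = acc ++ xs.map f := by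
  induction xs generalizing acc with
  | nil => simp
  | cons x t ih => simp [List.foldl, ih]

theorem pv_foldl_min_replicate (m : Nat) (n : Nat) :
    (List.replicate n m).foldl min m = m := by
  induction n with
  | zero => rfl
  | succ k ih => simpa [List.replicate_succ, List.foldl] using ih

-- the k-th entry of a padded row equals A's clamped lookup
theorem pv_col (g : List Int) (M : Int) (k : Nat)
    (hlen : g.length ≤ M.toNat) (hk : k < M.toNat) :
    (g ++ List.replicate (M - (g.length : Int)).toNat ((PySem.List.pyGet? g (-1)).getD 0)).getD k 0
      = if (k : Int) < (g.length : Int) then (PySem.List.pyGet? g (k : Int)).getD 0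
        else (PySem.List.pyGet? g (-1)).getD 0 := by
  by_cases hc : k < g.length
  · rw [if_pos (by exact_mod_cast hc)]
    simp [List.getD, List.getElem?_append_left hc, PySem.List.pyGet?_natCast]
  · rw [if_neg (by omega)]
    have hk' : g.length ≤ k := by omega
    have ht : (M - (g.length : Int)).toNat = M.toNat - g.length := by omega
    have hlt : k - g.length < M.toNat - g.length := by omega
    simp [List.getD, List.getElem?_append_right hk', ht, hlt]

-- ===== VERDICT (by name: the statement is the Claim_ definition above) =====
theorem get_pp_groups_spec : Claim_equal_get_pp_groups := by
  intro tp_groups _ hpre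
  obtain ⟨hne, hall⟩ := hpre
  unfold Spec_get_pp_groups get_pp_groups get_pp_groups_alt
  cases h : PySem.List.max? (tp_groups.map (fun g => (g.length : Int))) (fun y => y) with
  | none => rfl
  | some M =>
    have hM0 : 0 ≤ M := by
      have hm := PySem.List.max?_mem h
      simp only [List.mem_map] at hm
      obtain ⟨g, -, hg⟩ := hm
      omega
    have hle : ∀ g ∈ tp_groups, g.length ≤ M.toNat := by
      intro g hg
      have := PySem.List.max?_isMax h ((g.length : Int)) (List.mem_map_of_mem hg)
      omega
    -- the padded rows all have length M.toNat
    have hpadlen : (tp_groups.map (fun g =>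
        g ++ List.replicate (M - (g.length : Int)).toNat ((PySem.List.pyGet? g (-1)).getD 0))).map
          List.length = List.replicate tp_groups.length M.toNat := by
      rw [List.map_map]
      rw [List.map_eq_replicate_iff]
      intro g hg
      have := hle g hg
      simp only [Function.comp, List.length_append, List.length_replicate]
      omega
    cases tp_groups with
    | nil => exact absurd rfl hne
    | cons g0 gs =>
      simp only [List.map_cons, List.length_cons, List.replicate_succ, List.cons.injEq] at hpadlen
      obtain ⟨hL, hLs⟩ := hpadlen
      dsimp only
      rw [PySem.List.pyRange_one]
      simp only [List.foldl_map, pv_foldl_append_map, List.nil_append, Int.sub_zero, zero_add,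
        List.map_cons, hL, hLs, pv_foldl_min_replicate]
      apply List.map_congr_left
      intro k hk
      rw [List.mem_range] at hk
      simp only [List.map_map, List.cons.injEq]
      constructor
      · exact (pv_col g0 M k (hle g0 (by simp)) hk).symm
      · apply List.map_congr_left
        intro g hg
        exact (pv_col g M k (hle g (by simp [hg])) hk).symm
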